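-- pv_equiv track=rewrite | github.com/GreerPage/chess-cli | chess_cli/utils.py | get_path_between_points
-- ===== SOURCE A (Python) =====
-- def get_path_between_points(c, n):
--     cx, cy = c
--     nx, ny = n
--     if cx < nx and cy==ny:
--         return [[cx+i+1, cy] for i in range(nx-cx)]
--     if cx > nx and cy == ny:
--         return [[cx-i, cy] for i in range(1, cx-nx+1)]
--     if cx == nx and cy > ny:
--         return [[cx, cy-i-1] for i in range(cy-ny)]
--     if cx == nx and cy < ny:
--         return [[cx, cy+i+1] for i in range(ny-cy)]
--     if cx < nx and cy > ny:
--         return [[cx+i, cy-i] for i in range(1, nx-cx+1)]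
--     if cx < nx and cy < ny:
--         return [[cx+i+1, cy+i+1] for i in range(nx-cx)]
--     if cx > nx and cy > ny:
--         return [[cx-i, cy-i] for i in range(1, cx-nx+1)]
--     if cx > nx and cy < ny:
--         return [[cx-i, cy+i] for i in range(1, cx-nx+1)]
-- ===== SOURCE B (Python) =====
-- def get_path_between_points(c, n):
--     cx, cy = c
--     nx, ny = n
--     if c == n:
--         return None
--     steps = abs(nx - cx) or abs(ny - cy)
--     if nx > cx:
--         xs = range(cx + 1, cx + steps + 1)
--     elif nx < cx:
--         xs = range(cx - 1, cx - steps - 1, -1)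
--     else:
--         xs = [cx] * steps
--     if ny > cy:
--         ys = range(cy + 1, cy + steps + 1)
--     elif ny < cy:
--         ys = range(cy - 1, cy - steps - 1, -1)
--     else:
--         ys = [cy] * steps
--     return [[x, y] for x, y in zip(xs, ys)]
-- ===== Notes on version B (the rewrite author's own statement) =====
-- stated objective: alternative
-- what changed: Instead of A's eight directional branches each emitting the path points directly, B builds the x-coordinate sequence and the y-coordinate sequence independently (a range for a moving axis, a repeated constant for a fixed axis) and then zips the two sequences into the list of squares.
-- outside the precondition, e.g. on get_path_between_points((0, 0), (0, 0)): A returns None, B returns None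
import Mathlib
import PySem

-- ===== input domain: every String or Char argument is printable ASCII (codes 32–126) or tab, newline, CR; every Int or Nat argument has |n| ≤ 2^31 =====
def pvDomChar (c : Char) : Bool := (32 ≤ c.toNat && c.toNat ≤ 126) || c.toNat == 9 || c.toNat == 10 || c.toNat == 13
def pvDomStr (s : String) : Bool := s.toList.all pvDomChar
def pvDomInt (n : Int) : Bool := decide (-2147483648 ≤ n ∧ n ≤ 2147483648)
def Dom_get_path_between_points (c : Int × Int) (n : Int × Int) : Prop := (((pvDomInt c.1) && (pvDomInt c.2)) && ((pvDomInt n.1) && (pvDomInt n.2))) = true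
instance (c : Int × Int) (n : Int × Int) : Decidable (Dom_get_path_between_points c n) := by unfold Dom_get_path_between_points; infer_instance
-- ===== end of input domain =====

-- B builds the x- and y-coordinate sequences separately and zips them, instead of A's eight branch-specific comprehensions.


-- ===== PORT A =====
def get_path_between_points (c : Int × Int) (n : Int × Int) : List (List Int) :=
  let cx := c.1; let cy := c.2
  let nx := n.1; let ny := n.2
  if cx < nx ∧ cy = ny then
    (PySem.List.pyRange 0 (nx - cx) 1).map (fun i => [cx + i + 1, cy])
  else if cx > nx ∧ cy = ny then
    (PySem.List.pyRange 1 (cx - nx + 1) 1).map (fun i => [cx - i, cy])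
  else if cx = nx ∧ cy > ny then
    (PySem.List.pyRange 0 (cy - ny) 1).map (fun i => [cx, cy - i - 1])
  else if cx = nx ∧ cy < ny then
    (PySem.List.pyRange 0 (ny - cy) 1).map (fun i => [cx, cy + i + 1])
  else if cx < nx ∧ cy > ny then
    (PySem.List.pyRange 1 (nx - cx + 1) 1).map (fun i => [cx + i, cy - i])
  else if cx < nx ∧ cy < ny then
    (PySem.List.pyRange 0 (nx - cx) 1).map (fun i => [cx + i + 1, cy + i + 1])
  else if cx > nx ∧ cy > ny then
    (PySem.List.pyRange 1 (cx - nx + 1) 1).map (fun i => [cx - i, cy - i])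
  else if cx > nx ∧ cy < ny then
    (PySem.List.pyRange 1 (cx - nx + 1) 1).map (fun i => [cx - i, cy + i])
  else []  -- Python A falls through and returns None here (only when c = n); excluded by Pre_

-- ===== PORT B =====
def get_path_between_points_alt (c : Int × Int) (n : Int × Int) : List (List Int) :=
  let cx := c.1; let cy := c.2
  let nx := n.1; let ny := n.2
  if c = n then []  -- Python B returns None here; excluded by Pre_
  else
    -- Python's `abs(nx-cx) or abs(ny-cy)`: first operand unless it is 0
    let steps : Int := if |nx - cx| ≠ 0 then |nx - cx| else |ny - cy|
    let xs : List Int :=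
      if nx > cx then PySem.List.pyRange (cx + 1) (cx + steps + 1) 1
      else if nx < cx then PySem.List.pyRange (cx - 1) (cx - steps - 1) (-1)
      else List.replicate steps.toNat cx
    let ys : List Int :=
      if ny > cy then PySem.List.pyRange (cy + 1) (cy + steps + 1) 1
      else if ny < cy then PySem.List.pyRange (cy - 1) (cy - steps - 1) (-1)
      else List.replicate steps.toNat cy
    List.zipWith (fun x y => [x, y]) xs ys

-- ===== PRECONDITION & SPEC =====
-- Pre_ excludes only c = n, where Python A falls through all branches and returns None, not a list.
def Pre_get_path_between_points (c : Int × Int) (n : Int × Int) : Prop := c ≠ n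
instance (c : Int × Int) (n : Int × Int) : Decidable (Pre_get_path_between_points c n) := by unfold Pre_get_path_between_points; infer_instance
def pvWitness_get_path_between_points : (Int × Int) × (Int × Int) := ((0, 0), (2, 3))
def Spec_get_path_between_points (c : Int × Int) (n : Int × Int) (out : List (List Int)) : Prop := out = get_path_between_points_alt c n
instance (c : Int × Int) (n : Int × Int) (out : List (List Int)) : Decidable (Spec_get_path_between_points c n out) := by unfold Spec_get_path_between_points; infer_instance

-- ===== CLAIM (what is proved, stated in full; the proofs are below) =====
def Claim_equal_get_path_between_points : Prop := ∀ (c : Int × Int) (n : Int × Int), Dom_get_path_between_points c n → Pre_get_path_between_points c n → Spec_get_path_between_points c n (get_path_between_points c n)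

-- ===== LEMMAS AND PROOFS =====

-- ===== VERDICT (by name: the statement is the Claim_ definition above) =====
set_option maxHeartbeats 4000000 in
theorem get_path_between_points_spec : Claim_equal_get_path_between_points := by
  intro c n _ hpre
  rcases c with ⟨cx, cy⟩
  rcases n with ⟨nx, ny⟩
  unfold Spec_get_path_between_points get_path_between_points get_path_between_points_alt
  simp only [Prod.mk.injEq, ne_eq]
  have hne : ¬ (cx = nx ∧ cy = ny) := fun ⟨h1, h2⟩ => hpre (by simp [h1, h2])
  rcases abs_cases (nx - cx) with ⟨hax, hax'⟩ | ⟨hax, hax'⟩ <;>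
  rcases abs_cases (ny - cy) with ⟨hay, hay'⟩ | ⟨hay, hay'⟩ <;>
  rw [hax, hay] <;>
  split_ifs <;>
  first
    | omega
    | (exfalso; omega)
    | (simp only [PySem.List.pyRange_one, PySem.List.pyRange_neg_one, List.map_map]
       refine List.ext_getElem (by simp only [List.length_map, List.length_range,
         List.length_zipWith, List.length_replicate]; omega) ?_
       intro k h1 h2
       simp only [List.length_map, List.length_range, List.length_zipWith,
         List.length_replicate, Nat.lt_min] at h1 h2
       simp only [List.getElem_zipWith, List.getElem_map, List.getElem_range,
         List.getElem_replicate, Function.comp]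
       simp only [List.cons.injEq, and_true, true_and]
       first
         | (constructor <;> omega)
         | omega)
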